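-- pv_equiv track=rewrite | github.com/AidanCeney/Temporal_Metablomic_Feature_Selection | Compare_Var_Importance.py | get_Matching_VarImportance
-- ===== SOURCE A (Python) =====
-- def get_Matching_VarImportance(Top_100_Pimp,Top_100_Vita):
--
--
--     Matches = []
--     i = 0
--     for Pimp in Top_100_Pimp:
--         j = 0
--         for Vita in Top_100_Vita:
--             if(Pimp[0] == Vita[0] and not Pimp[0] in Matches):
--                 Matches.append([Pimp[0],i,j])
--             j = j+1
--         i = i+1
--     return Matches
-- ===== SOURCE B (Python) =====
-- def get_Matching_VarImportance(Top_100_Pimp, Top_100_Vita):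
--     # Nothing to match if either list is empty: no row is ever indexed then.
--     if not Top_100_Pimp or not Top_100_Vita:
--         return []
--     # Index each Vita name to the list of j-positions where it occurs,
--     # then a single pass over Pimp emits all matching (name, i, j) triples.
--     index = {}
--     for j, row in enumerate(Top_100_Vita):
--         key = row[0]
--         index[key] = index.get(key, []) + [j]
--     Matches = []
--     for i, row in enumerate(Top_100_Pimp):
--         for j in index.get(row[0], []):
--             Matches.append([row[0], i, j])
--     return Matches
-- ===== Notes on version B (the rewrite author's own statement) =====
-- stated objective: faster
-- what changed: Replaces the nested scan of Top_100_Vita for every Pimp row (and A's dead 'name in Matches' test, which compares an int against lists and is always False) by a one-pass hash index from Vita name to its j-positions, looked up once per Pimp row.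
import Mathlib
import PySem

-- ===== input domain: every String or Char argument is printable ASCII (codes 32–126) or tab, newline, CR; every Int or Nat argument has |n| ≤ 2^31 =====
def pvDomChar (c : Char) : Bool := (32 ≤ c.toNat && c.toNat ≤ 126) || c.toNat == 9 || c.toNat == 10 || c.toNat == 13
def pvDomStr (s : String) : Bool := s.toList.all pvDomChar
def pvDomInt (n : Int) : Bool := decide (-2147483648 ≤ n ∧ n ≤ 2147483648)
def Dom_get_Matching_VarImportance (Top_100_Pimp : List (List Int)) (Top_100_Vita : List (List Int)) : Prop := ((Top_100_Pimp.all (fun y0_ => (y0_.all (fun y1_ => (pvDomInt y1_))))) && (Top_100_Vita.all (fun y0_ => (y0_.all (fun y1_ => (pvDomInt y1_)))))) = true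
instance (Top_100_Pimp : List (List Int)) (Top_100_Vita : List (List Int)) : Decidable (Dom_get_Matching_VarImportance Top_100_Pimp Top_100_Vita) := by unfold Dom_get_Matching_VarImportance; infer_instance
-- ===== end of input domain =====

-- B replaces A's nested rescans of Top_100_Vita by a hash index from name to its
-- j-positions built once (asymptotically faster); same return value on Pre_.

-- ===== PORT A =====
-- Python's 'Pimp[0] in Matches' tests an int against a list of LISTS; int == list
-- is always False in Python, so this helper is exactly that comparison:
def pvIntEqIntList (_x : Int) (_m : List Int) : Bool := false

def get_Matching_VarImportance (Top_100_Pimp : List (List Int)) (Top_100_Vita : List (List Int)) : List (List Int) :=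
  (Top_100_Pimp.foldl (fun (st : List (List Int) × Int) (Pimp : List Int) =>
      -- inner loop; Pimp[0] / Vita[0] are in range under Pre_
      let inner := Top_100_Vita.foldl (fun (st2 : List (List Int) × Int) (Vita : List Int) =>
          if (PySem.List.pyGet? Pimp 0).getD 0 == (PySem.List.pyGet? Vita 0).getD 0
              && !(st2.1.any (pvIntEqIntList ((PySem.List.pyGet? Pimp 0).getD 0))) then
            (st2.1 ++ [[(PySem.List.pyGet? Pimp 0).getD 0, st.2, st2.2]], st2.2 + 1)
          else (st2.1, st2.2 + 1)) (st.1, 0)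
      (inner.1, st.2 + 1)) ([], 0)).1

-- ===== PORT B =====
-- Source B's first loop: index[row[0]] = index.get(row[0], []) + [j]  (row[0] in range under Pre_)
def pvIndexB (Top_100_Vita : List (List Int)) : PySem.Dict Int (List Int) :=
  (PySem.List.enumerate Top_100_Vita).foldl
    (fun d jv => d.modify ((PySem.List.pyGet? jv.2 0).getD 0) [] (fun l => l ++ [jv.1]))
    PySem.Dict.empty

def get_Matching_VarImportance_alt (Top_100_Pimp : List (List Int)) (Top_100_Vita : List (List Int)) : List (List Int) :=
  -- Source B: 'if not Top_100_Pimp or not Top_100_Vita: return []'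
  if Top_100_Pimp = [] ∨ Top_100_Vita = [] then []
  else
    (PySem.List.enumerate Top_100_Pimp).foldl
      (fun acc ip =>
        acc ++ ((pvIndexB Top_100_Vita).getD ((PySem.List.pyGet? ip.2 0).getD 0) []).map
          (fun j => [(PySem.List.pyGet? ip.2 0).getD 0, ip.1, j])) []

-- ===== PRECONDITION & SPEC =====
-- Pre_ excludes exactly the inputs on which A raises IndexError: both lists
-- nonempty (so A actually indexes rows) with an empty row in either list.
def Pre_get_Matching_VarImportance (Top_100_Pimp : List (List Int)) (Top_100_Vita : List (List Int)) : Prop :=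
  Top_100_Pimp = [] ∨ Top_100_Vita = [] ∨
    ((∀ r ∈ Top_100_Pimp, r ≠ []) ∧ (∀ r ∈ Top_100_Vita, r ≠ []))
instance (Top_100_Pimp : List (List Int)) (Top_100_Vita : List (List Int)) : Decidable (Pre_get_Matching_VarImportance Top_100_Pimp Top_100_Vita) := by unfold Pre_get_Matching_VarImportance; infer_instance

def pvWitness_get_Matching_VarImportance : List (List Int) × List (List Int) :=
  ([[1, 10], [2, 20]], [[2, 5], [1, 7], [2, 9]])

def Spec_get_Matching_VarImportance (Top_100_Pimp : List (List Int)) (Top_100_Vita : List (List Int)) (out : List (List Int)) : Prop := out = get_Matching_VarImportance_alt Top_100_Pimp Top_100_Vita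
instance (Top_100_Pimp : List (List Int)) (Top_100_Vita : List (List Int)) (out : List (List Int)) : Decidable (Spec_get_Matching_VarImportance Top_100_Pimp Top_100_Vita out) := by unfold Spec_get_Matching_VarImportance; infer_instance

-- ===== CLAIM (what is proved, stated in full; the proofs are below) =====
def Claim_equal_get_Matching_VarImportance : Prop := ∀ (Top_100_Pimp : List (List Int)) (Top_100_Vita : List (List Int)), Dom_get_Matching_VarImportance Top_100_Pimp Top_100_Vita → Pre_get_Matching_VarImportance Top_100_Pimp Top_100_Vita → Spec_get_Matching_VarImportance Top_100_Pimp Top_100_Vita (get_Matching_VarImportance Top_100_Pimp Top_100_Vita)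

-- ===== LEMMAS AND PROOFS =====

lemma pv_any_false (l : List (List Int)) (x : Int) : l.any (pvIntEqIntList x) = false := by
  induction l with
  | nil => rfl
  | cons a t ih => simp [pvIntEqIntList, ih]

-- A's inner loop over Top_100_Vita, for a fixed Pimp row (p0) and outer counter i.
lemma pv_innerA_clean (p0 i : Int) (V : List (List Int)) (M : List (List Int)) (j : Int) :
    V.foldl (fun (st2 : List (List Int) × Int) (Vita : List Int) =>
        if p0 == (PySem.List.pyGet? Vita 0).getD 0 then
          (st2.1 ++ [[p0, i, st2.2]], st2.2 + 1)
        else (st2.1, st2.2 + 1)) (M, j)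
    = (M ++ ((PySem.List.enumerate V j).filter
          (fun jv => p0 == (PySem.List.pyGet? jv.2 0).getD 0)).map
          (fun jv => [p0, i, jv.1]),
       j + V.length) := by
  induction V generalizing M j with
  | nil => simp [PySem.List.enumerate_nil]
  | cons v t ih =>
    rw [List.foldl_cons]
    show List.foldl _
        (if p0 == (PySem.List.pyGet? v 0).getD 0 then (M ++ [[p0, i, j]], j + 1) else (M, j + 1)) t = _
    rw [PySem.List.enumerate_cons, List.filter_cons]
    by_cases h : (p0 == (PySem.List.pyGet? v 0).getD 0) = true
    · rw [if_pos h, ih, h, Prod.mk.injEq]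
      refine ⟨by simp, by push_cast [List.length_cons]; ring⟩
    · rw [if_neg h, ih, Bool.not_eq_true] at *
      rw [h, Prod.mk.injEq]
      refine ⟨by simp, by push_cast [List.length_cons]; ring⟩

lemma pv_innerA (p0 i : Int) (V : List (List Int)) (M : List (List Int)) (j : Int) :
    V.foldl (fun (st2 : List (List Int) × Int) (Vita : List Int) =>
        if p0 == (PySem.List.pyGet? Vita 0).getD 0 && !(st2.1.any (pvIntEqIntList p0)) then
          (st2.1 ++ [[p0, i, st2.2]], st2.2 + 1)
        else (st2.1, st2.2 + 1)) (M, j)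
    = (M ++ ((PySem.List.enumerate V j).filter
          (fun jv => p0 == (PySem.List.pyGet? jv.2 0).getD 0)).map
          (fun jv => [p0, i, jv.1]),
       j + V.length) := by
  rw [show (fun (st2 : List (List Int) × Int) (Vita : List Int) =>
        if p0 == (PySem.List.pyGet? Vita 0).getD 0 && !(st2.1.any (pvIntEqIntList p0)) then
          (st2.1 ++ [[p0, i, st2.2]], st2.2 + 1)
        else (st2.1, st2.2 + 1))
      = (fun (st2 : List (List Int) × Int) (Vita : List Int) =>
        if p0 == (PySem.List.pyGet? Vita 0).getD 0 then
          (st2.1 ++ [[p0, i, st2.2]], st2.2 + 1)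
        else (st2.1, st2.2 + 1)) from by
        funext st2 Vita; simp [pv_any_false]]
  exact pv_innerA_clean p0 i V M j

-- A's outer loop, characterised as a flatMap over enumerate.
lemma pv_outerA (V : List (List Int)) (P : List (List Int)) (M : List (List Int)) (i : Int) :
    (P.foldl (fun (st : List (List Int) × Int) (Pimp : List Int) =>
        let inner := V.foldl (fun (st2 : List (List Int) × Int) (Vita : List Int) =>
            if (PySem.List.pyGet? Pimp 0).getD 0 == (PySem.List.pyGet? Vita 0).getD 0
                && !(st2.1.any (pvIntEqIntList ((PySem.List.pyGet? Pimp 0).getD 0))) then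
              (st2.1 ++ [[(PySem.List.pyGet? Pimp 0).getD 0, st.2, st2.2]], st2.2 + 1)
            else (st2.1, st2.2 + 1)) (st.1, 0)
        (inner.1, st.2 + 1)) (M, i)).1
    = M ++ (PySem.List.enumerate P i).flatMap (fun ip =>
        ((PySem.List.enumerate V 0).filter
            (fun jv => (PySem.List.pyGet? ip.2 0).getD 0 == (PySem.List.pyGet? jv.2 0).getD 0)).map
            (fun jv => [(PySem.List.pyGet? ip.2 0).getD 0, ip.1, jv.1])) := by
  induction P generalizing M i with
  | nil => simp [PySem.List.enumerate_nil]
  | cons p t ih =>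
    simp only [List.foldl_cons, PySem.List.enumerate_cons, List.flatMap_cons]
    rw [pv_innerA ((PySem.List.pyGet? p 0).getD 0) i V M 0, ih]
    simp

lemma pv_beq_comm (a b : Int) : (a == b) = (b == a) := by
  by_cases h : a = b
  · rw [h]
  · rw [beq_eq_false_iff_ne.mpr h, beq_eq_false_iff_ne.mpr (Ne.symm h)]

-- B's index dict looked up at p0 yields exactly the matching j's, in order.
lemma pv_index_getD (V : List (List Int)) (p0 : Int) :
    ((pvIndexB V).getD p0 [])
    = ((PySem.List.enumerate V 0).filter
        (fun jv => (PySem.List.pyGet? jv.2 0).getD 0 == p0)).map (fun jv => jv.1) := by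
  have h := PySem.Dict.getD_foldl_modify_append
      (l := (PySem.List.enumerate V 0).map (fun jv => ((PySem.List.pyGet? jv.2 0).getD 0, jv.1)))
      (d := (PySem.Dict.empty : PySem.Dict Int (List Int))) (c := p0)
  rw [List.foldl_map] at h
  unfold pvIndexB
  simp only [List.filter_map, List.map_map, PySem.Dict.getD_empty, List.nil_append,
    Function.comp_def] at h
  exact h

set_option maxRecDepth 4000 in
theorem get_Matching_VarImportance_spec_aux (P V : List (List Int)) :
    get_Matching_VarImportance P V = get_Matching_VarImportance_alt P V := by
  unfold get_Matching_VarImportance get_Matching_VarImportance_alt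
  by_cases hPV : P = [] ∨ V = []
  · rw [if_pos hPV, pv_outerA]
    rcases hPV with h | h <;> subst h <;> simp [PySem.List.enumerate_nil]
  · rw [if_neg hPV, pv_outerA, PySem.List.foldl_append_eq_flatMap]
    simp only [List.nil_append, pv_index_getD, List.map_map]
    apply List.flatMap_congr
    intro ip _
    congr 1
    apply List.filter_congr
    intro jv _
    exact pv_beq_comm _ _

-- ===== VERDICT (by name: the statement is the Claim_ definition above) =====
theorem get_Matching_VarImportance_spec : Claim_equal_get_Matching_VarImportance := by
  intro P V _ _
  unfold Spec_get_Matching_VarImportance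
  exact get_Matching_VarImportance_spec_aux P V
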